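-- pv_equiv track=rewrite | github.com/JoaquinBlasco10/ProgAvan2025 | p1y2.py | comparar_pos_neg
-- ===== SOURCE A (Python) =====
-- def comparar_pos_neg(nums):
--     pos = sum(1 for n in nums if n > 0)
--     neg = sum(1 for n in nums if n < 0)
--     if pos > neg:
--         return "Más positivos"
--     elif neg > pos:
--         return "Más negativos"
--     else:
--         return "Iguales"
-- ===== SOURCE B (Python) =====
-- def comparar_pos_neg(nums):
--     signs = [(n > 0) - (n < 0) for n in nums]
--     balance = sum(signs)
--     if balance > 0:
--         return "Más positivos"
--     if balance < 0:
--         return "Más negativos"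
--     return "Iguales"
-- ===== Notes on version B (the rewrite author's own statement) =====
-- stated objective: alternative
-- what changed: Instead of two separate counting passes over the list, B maps each element to its sign (+1/0/-1 via bool arithmetic), sums that list into one net-balance scalar, and branches on its sign.
import Mathlib
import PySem

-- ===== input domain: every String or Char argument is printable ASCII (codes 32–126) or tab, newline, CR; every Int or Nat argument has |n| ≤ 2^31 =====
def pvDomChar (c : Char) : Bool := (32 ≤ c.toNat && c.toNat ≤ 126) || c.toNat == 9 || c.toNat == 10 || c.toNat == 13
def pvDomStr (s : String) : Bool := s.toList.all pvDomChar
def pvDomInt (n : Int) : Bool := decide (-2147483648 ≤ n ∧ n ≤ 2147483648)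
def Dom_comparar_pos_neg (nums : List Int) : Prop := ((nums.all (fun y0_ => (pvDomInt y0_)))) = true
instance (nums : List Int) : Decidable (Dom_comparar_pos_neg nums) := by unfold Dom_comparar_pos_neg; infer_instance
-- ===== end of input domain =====

-- B maps each element to its sign and sums one net-balance scalar instead of A's two counting passes; same return value.

-- ===== PORT A =====
def comparar_pos_neg (nums : List Int) : String :=
  let pos := nums.foldl (fun acc n => if n > 0 then acc + 1 else acc) (0 : Int)
  let neg := nums.foldl (fun acc n => if n < 0 then acc + 1 else acc) (0 : Int)
  if pos > neg then "Más positivos"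
  else if neg > pos then "Más negativos"
  else "Iguales"

-- ===== PORT B =====
-- (n > 0) - (n < 0) with Python bool arithmetic
def pySign (n : Int) : Int :=
  (if 0 < n then (1 : Int) else 0) - (if n < 0 then (1 : Int) else 0)

def comparar_pos_neg_alt (nums : List Int) : String :=
  let signs := nums.map pySign
  let balance := signs.sum
  if balance > 0 then "Más positivos"
  else if balance < 0 then "Más negativos"
  else "Iguales"

-- ===== PRECONDITION & SPEC =====
def Spec_comparar_pos_neg (nums : List Int) (out : String) : Prop := out = comparar_pos_neg_alt nums
instance (nums : List Int) (out : String) : Decidable (Spec_comparar_pos_neg nums out) := by unfold Spec_comparar_pos_neg; infer_instance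

-- ===== CLAIM (what is proved, stated in full; the proofs are below) =====
def Claim_equal_comparar_pos_neg : Prop := ∀ (nums : List Int), Dom_comparar_pos_neg nums → Spec_comparar_pos_neg nums (comparar_pos_neg nums)

-- ===== LEMMAS AND PROOFS =====

-- the sign-sum equals the difference of the two counting folds
theorem sign_sum_eq_diff (nums : List Int) (p n : Int) :
    p - n + (nums.map pySign).sum
      = nums.foldl (fun acc x => if x > 0 then acc + 1 else acc) p
        - nums.foldl (fun acc x => if x < 0 then acc + 1 else acc) n := by
  induction nums generalizing p n with
  | nil => simp
  | cons x xs ih =>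
    simp only [List.map_cons, List.sum_cons, List.foldl_cons]
    by_cases hx : x > 0
    · rw [if_pos hx, if_neg (show ¬ x < 0 by omega)]
      have h := ih (p + 1) n
      have hs : pySign x = 1 := by simp [pySign, hx, show ¬ x < 0 by omega]
      rw [hs, ← h]; ring
    · by_cases hx' : x < 0
      · rw [if_neg hx, if_pos hx']
        have h := ih p (n + 1)
        have hs : pySign x = -1 := by simp [pySign, hx, hx']
        rw [hs, ← h]; ring
      · rw [if_neg hx, if_neg hx']
        have h := ih p n
        have hs : pySign x = 0 := by simp [pySign, hx, hx']
        rw [hs, ← h]; ring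

-- ===== VERDICT (by name: the statement is the Claim_ definition above) =====
theorem comparar_pos_neg_spec : Claim_equal_comparar_pos_neg := by
  intro nums _
  unfold Spec_comparar_pos_neg comparar_pos_neg comparar_pos_neg_alt
  have h := sign_sum_eq_diff nums 0 0
  simp only [sub_zero, zero_add] at h
  simp only [h]
  split_ifs <;> (first | rfl | omega)
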